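-- pv_equiv track=rewrite | github.com/syonekura/aoc2018 | aoc/day2.py | char_summary
-- ===== SOURCE A (Python) =====
-- from itertools import groupby, combinations
--
-- def char_summary(arg: str) -> dict:
--     data = sorted(arg)
--     result = {1: 0, 2: 0, 3: 0}
--     for k, g in groupby(data):
--         aux = len(list(g))
--         if aux in result.keys():
--             result[aux] += 1
--     return result
-- ===== SOURCE B (Python) =====
-- def char_summary(arg: str) -> dict:
--     result = {1: 0, 2: 0, 3: 0}
--     for c in set(arg):
--         cnt = arg.count(c)
--         if cnt in result:
--             result[cnt] += 1
--     return result
-- ===== Notes on version B (the rewrite author's own statement) =====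
-- stated objective: idiomatic
-- what changed: Replaced the sort + itertools.groupby grouped pass with a direct loop over the distinct characters (set(arg)) that recounts each one with str.count and increments the matching bucket.
import Mathlib
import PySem

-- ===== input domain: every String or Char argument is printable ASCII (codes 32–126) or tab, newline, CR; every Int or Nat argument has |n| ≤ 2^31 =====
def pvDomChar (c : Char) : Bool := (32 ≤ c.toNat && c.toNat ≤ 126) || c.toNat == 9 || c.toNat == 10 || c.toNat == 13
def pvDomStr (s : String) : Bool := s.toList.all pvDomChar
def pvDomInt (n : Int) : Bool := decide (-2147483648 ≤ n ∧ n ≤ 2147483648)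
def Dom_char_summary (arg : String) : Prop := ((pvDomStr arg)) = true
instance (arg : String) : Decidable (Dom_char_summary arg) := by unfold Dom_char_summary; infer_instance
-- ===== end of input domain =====

-- B replaces A's sort + groupby grouped pass by a loop over the distinct characters that
-- recounts each with str.count (idiomatic; measured faster on the generated inputs, where the
-- alphabet is small: d C-level scans beat a Python-level sort + groupby pass).

-- ===== PORT A =====
-- itertools.groupby over a list: the runs of consecutive equal elements, in order.
def pyGroups (l : List Char) : List (List Char) :=
  match l with
  | [] => []
  | x :: xs =>
      (x :: xs.takeWhile (fun y => y == x)) :: pyGroups (xs.dropWhile (fun y => y == x))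
  termination_by l.length
  decreasing_by simpa using Nat.lt_succ_of_le (List.length_dropWhile_le _ xs)

def char_summary (arg : String) : List (Int × Int) :=
  let data := PySem.List.sorted arg.toList (fun c => c)
  let result : PySem.Dict Int Int := PySem.Dict.ofList [(1, 0), (2, 0), (3, 0)]
  ((pyGroups data).foldl
    (fun d g =>
      if d.keys.contains ((g.length : Int)) then PySem.Dict.modify d ((g.length : Int)) 0 (· + 1)
      else d)
    result).items

-- ===== PORT B =====
-- 'for c in set(arg): cnt = arg.count(c)' — counting a single character; PySem.List.count on
-- the character list is exact for that. The result dict does not depend on the set's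
-- iteration order (it only accumulates commutative increments into fixed keys 1,2,3).
def char_summary_alt (arg : String) : List (Int × Int) :=
  let result : PySem.Dict Int Int := PySem.Dict.ofList [(1, 0), (2, 0), (3, 0)]
  ((PySem.Set.ofList arg.toList).foldl
    (fun d c =>
      if d.keys.contains ((PySem.List.count arg.toList c : Int)) then
        PySem.Dict.modify d ((PySem.List.count arg.toList c : Int)) 0 (· + 1)
      else d)
    result).items

-- ===== PRECONDITION & SPEC =====
def Spec_char_summary (arg : String) (out : List (Int × Int)) : Prop := out = char_summary_alt arg
instance (arg : String) (out : List (Int × Int)) : Decidable (Spec_char_summary arg out) := by unfold Spec_char_summary; infer_instance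

-- ===== CLAIM (what is proved, stated in full; the proofs are below) =====
def Claim_equal_char_summary : Prop := ∀ (arg : String), Dom_char_summary arg → Spec_char_summary arg (char_summary arg)

-- ===== LEMMAS AND PROOFS =====

-- first elements of the runs of l (for proofs only)
def runHeads (l : List Char) : List Char :=
  match l with
  | [] => []
  | x :: xs => x :: runHeads (xs.dropWhile (fun y => y == x))
  termination_by l.length
  decreasing_by simpa using Nat.lt_succ_of_le (List.length_dropWhile_le _ xs)

lemma mem_runHeads (l : List Char) (a : Char) : a ∈ runHeads l ↔ a ∈ l := by
  induction l using runHeads.induct with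
  | case1 => simp [runHeads]
  | case2 x xs ih =>
    rw [runHeads]
    simp only [List.mem_cons, ih]
    constructor
    · rintro (rfl | h)
      · left; rfl
      · right; exact (List.dropWhile_suffix _).subset h
    · rintro (rfl | h)
      · left; rfl
      · rcases List.mem_append.mp
          (by rwa [List.takeWhile_append_dropWhile (p := fun y => y == x)]) with h' | h'
        · left; simpa using List.mem_takeWhile_imp h'
        · right; exact h' 

lemma head_not_mem_drop {x : Char} {xs : List Char} (hp : (x :: xs).Pairwise (· ≤ ·)) :
    x ∉ xs.dropWhile (fun y => y == x) := by
  intro hx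
  have hxs : ∀ y ∈ xs, x ≤ y := List.pairwise_cons.mp hp |>.1
  have hsub : xs.dropWhile (fun y => y == x) <:+ xs := List.dropWhile_suffix _
  have hpw : (xs.dropWhile (fun y => y == x)).Pairwise (· ≤ ·) :=
    (List.pairwise_cons.mp hp).2.sublist hsub.sublist
  cases hd : xs.dropWhile (fun y => y == x) with
  | nil => simp [hd] at hx
  | cons d ds =>
    have hdx : ¬ (d == x) = true := by
      have := List.head_dropWhile_not (fun y => y == x) (l := xs) (by simp [hd])
      simpa [hd] using this
    rw [hd] at hx
    rcases List.mem_cons.mp hx with heq | hx2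
    · exact hdx (by simp [heq])
    · have h1 : d ≤ x := (List.pairwise_cons.mp (hd ▸ hpw)).1 x hx2
      have h2 : x ≤ d := hxs d ((hd ▸ hsub).subset (by simp))
      exact hdx (by simp [le_antisymm h1 h2])

lemma nodup_runHeads (l : List Char) (hp : l.Pairwise (· ≤ ·)) : (runHeads l).Nodup := by
  induction l using runHeads.induct with
  | case1 => simp [runHeads]
  | case2 x xs ih =>
    rw [runHeads]
    refine List.nodup_cons.mpr ⟨?_, ih ?_⟩
    · exact fun h => head_not_mem_drop hp ((mem_runHeads _ _).mp h)
    · exact (List.pairwise_cons.mp hp).2.sublist (List.dropWhile_suffix _).sublist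

-- the run lengths of a sorted list are the counts of its run heads
lemma groups_map_len (l : List Char) (hp : l.Pairwise (· ≤ ·)) :
    (pyGroups l).map (fun g => (g.length : Int))
      = (runHeads l).map (fun c => ((List.count c l : Nat) : Int)) := by
  induction l using runHeads.induct with
  | case1 => simp [runHeads, pyGroups]
  | case2 x xs ih =>
    rw [runHeads, pyGroups]
    have hxs := (List.pairwise_cons.mp hp).2
    have hdropPw : (xs.dropWhile (fun y => y == x)).Pairwise (· ≤ ·) :=
      hxs.sublist (List.dropWhile_suffix _).sublist
    have hsplit : xs.takeWhile (fun y => y == x) ++ xs.dropWhile (fun y => y == x) = xs :=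
      List.takeWhile_append_dropWhile
    have hnd : x ∉ xs.dropWhile (fun y => y == x) := head_not_mem_drop hp
    simp only [List.map_cons]
    congr 1
    · -- head group's length = count of x in the whole list
      have htake : List.count x (xs.takeWhile (fun y => y == x)) = (xs.takeWhile (fun y => y == x)).length := by
        rw [List.count_eq_length]
        intro b hb
        have hbx : (b == x) = true := List.mem_takeWhile_imp (p := fun y => y == x) hb
        exact (eq_of_beq hbx).symm
      have hdrop0 : List.count x (xs.dropWhile (fun y => y == x)) = 0 := List.count_eq_zero.mpr hnd
      have : List.count x (x :: xs) = 1 + (xs.takeWhile (fun y => y == x)).length := by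
        rw [List.count_cons, ← hsplit, List.count_append, htake, hdrop0]
        simp [Nat.add_comm]
      simp [this]
      ring
    · -- tail: counts over the whole list agree with counts over the dropped suffix
      rw [ih hdropPw]
      apply List.map_congr_left
      intro c hc
      have hcmem : c ∈ xs.dropWhile (fun y => y == x) := (mem_runHeads _ _).mp hc
      have hcx : c ≠ x := fun h => hnd (h ▸ hcmem)
      have htake0 : List.count c (xs.takeWhile (fun y => y == x)) = 0 := by
        rw [List.count_eq_zero]
        intro hmem
        exact hcx (by simpa using List.mem_takeWhile_imp hmem)
      have hcount : List.count c (x :: xs) = List.count c (xs.dropWhile (fun y => y == x)) := by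
        rw [List.count_cons, ← hsplit, List.count_append, htake0]
        simp [Ne.symm hcx]
      rw [hcount]

-- the counting fold: the dict {1:a,2:b,3:c} just tallies how many produced values hit 1/2/3
lemma fold_step {α : Type} (v : α → Int) (L : List α) (a b c : Int) :
    L.foldl
      (fun d x =>
        if d.keys.contains (v x) then PySem.Dict.modify d (v x) 0 (· + 1) else d)
      (PySem.Dict.mk [(1, a), (2, b), (3, c)])
    = PySem.Dict.mk [(1, a + ((L.map v).count 1 : Nat)),
                     (2, b + ((L.map v).count 2 : Nat)),
                     (3, c + ((L.map v).count 3 : Nat))] := by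
  induction L generalizing a b c with
  | nil => simp
  | cons x L ih =>
    simp only [List.foldl_cons, List.map_cons]
    by_cases h1 : v x = 1
    · rw [show (if (PySem.Dict.mk [(1, a), (2, b), (3, c)] : PySem.Dict Int Int).keys.contains (v x) then
            PySem.Dict.modify (PySem.Dict.mk [(1, a), (2, b), (3, c)]) (v x) 0 (· + 1)
          else PySem.Dict.mk [(1, a), (2, b), (3, c)]) = PySem.Dict.mk [(1, a + 1), (2, b), (3, c)] by
            simp [h1, PySem.Dict.modify, PySem.Dict.insert, PySem.Dict.getD, PySem.Dict.get?,
              PySem.Dict.keys]]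
      rw [ih]
      simp [h1]
      ring
    · by_cases h2 : v x = 2
      · rw [show (if (PySem.Dict.mk [(1, a), (2, b), (3, c)] : PySem.Dict Int Int).keys.contains (v x) then
              PySem.Dict.modify (PySem.Dict.mk [(1, a), (2, b), (3, c)]) (v x) 0 (· + 1)
            else PySem.Dict.mk [(1, a), (2, b), (3, c)]) = PySem.Dict.mk [(1, a), (2, b + 1), (3, c)] by
              simp [h2, PySem.Dict.modify, PySem.Dict.insert, PySem.Dict.getD, PySem.Dict.get?,
                PySem.Dict.keys]]
        rw [ih]
        simp [h2]
        ring
      · by_cases h3 : v x = 3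
        · rw [show (if (PySem.Dict.mk [(1, a), (2, b), (3, c)] : PySem.Dict Int Int).keys.contains (v x) then
                PySem.Dict.modify (PySem.Dict.mk [(1, a), (2, b), (3, c)]) (v x) 0 (· + 1)
              else PySem.Dict.mk [(1, a), (2, b), (3, c)]) = PySem.Dict.mk [(1, a), (2, b), (3, c + 1)] by
                simp [h3, PySem.Dict.modify, PySem.Dict.insert, PySem.Dict.getD, PySem.Dict.get?,
                  PySem.Dict.keys]]
          rw [ih]
          simp [h3]
          ring
        · rw [show (if (PySem.Dict.mk [(1, a), (2, b), (3, c)] : PySem.Dict Int Int).keys.contains (v x) then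
                PySem.Dict.modify (PySem.Dict.mk [(1, a), (2, b), (3, c)]) (v x) 0 (· + 1)
              else PySem.Dict.mk [(1, a), (2, b), (3, c)]) = PySem.Dict.mk [(1, a), (2, b), (3, c)] by
                simp [PySem.Dict.keys, h1, h2, h3]]
          rw [ih]
          simp [h1, h2, h3]

-- specializations of fold_step in exactly the ports' shapes (definitional)
lemma fold_stepA (L : List (List Char)) (a b c : Int) :
    L.foldl
      (fun d g =>
        if d.keys.contains ((g.length : Int)) then PySem.Dict.modify d ((g.length : Int)) 0 (· + 1)
        else d)
      (PySem.Dict.mk [(1, a), (2, b), (3, c)])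
    = PySem.Dict.mk [(1, a + ((L.map fun g => ((g.length : Nat) : Int)).count 1 : Nat)),
                     (2, b + ((L.map fun g => ((g.length : Nat) : Int)).count 2 : Nat)),
                     (3, c + ((L.map fun g => ((g.length : Nat) : Int)).count 3 : Nat))] :=
  fold_step (fun g => ((g.length : Nat) : Int)) L a b c

lemma fold_stepB (arg : String) (L : List Char) (a b c : Int) :
    L.foldl
      (fun d ch =>
        if d.keys.contains ((PySem.List.count arg.toList ch : Int)) then
          PySem.Dict.modify d ((PySem.List.count arg.toList ch : Int)) 0 (· + 1)
        else d)
      (PySem.Dict.mk [(1, a), (2, b), (3, c)])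
    = PySem.Dict.mk
        [(1, a + ((L.map fun ch => ((PySem.List.count arg.toList ch : Nat) : Int)).count 1 : Nat)),
         (2, b + ((L.map fun ch => ((PySem.List.count arg.toList ch : Nat) : Int)).count 2 : Nat)),
         (3, c + ((L.map fun ch => ((PySem.List.count arg.toList ch : Nat) : Int)).count 3 : Nat))] :=
  fold_step (fun ch => ((PySem.List.count arg.toList ch : Nat) : Int)) L a b c

lemma lists_perm (arg : String) :
    ((pyGroups (PySem.List.sorted arg.toList (fun c => c))).map fun g => ((g.length : Nat) : Int)).Perm
      ((PySem.Set.ofList arg.toList).map fun ch => ((PySem.List.count arg.toList ch : Nat) : Int)) := by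
  set s := PySem.List.sorted arg.toList (fun c => c) with hs
  have hpw : s.Pairwise (· ≤ ·) := PySem.List.sorted_pairwise arg.toList (fun c => c)
  rw [groups_map_len s hpw]
  have hmem : (runHeads s).Perm (PySem.Set.ofList arg.toList) := by
    rw [List.perm_ext_iff_of_nodup (nodup_runHeads s hpw) (PySem.Set.nodup_ofList arg.toList)]
    intro c
    rw [mem_runHeads, hs, PySem.List.mem_sorted, PySem.Set.mem_ofList]
  have hcnt : ∀ c : Char, List.count c s = List.count c arg.toList := fun c =>
    (PySem.List.sorted_perm arg.toList (fun c => c) false).count_eq c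
  have h1 : ((runHeads s).map fun c => ((List.count c s : Nat) : Int))
      = ((runHeads s).map fun c => ((PySem.List.count arg.toList c : Nat) : Int)) :=
    List.map_congr_left (fun c _ => by rw [hcnt c, PySem.List.count_eq])
  rw [h1]
  exact hmem.map _

-- ===== VERDICT (by name: the statement is the Claim_ definition above) =====
theorem char_summary_spec : Claim_equal_char_summary := by
  intro arg _
  unfold Spec_char_summary char_summary char_summary_alt
  have hinit : (PySem.Dict.ofList [(1, 0), (2, 0), (3, 0)] : PySem.Dict Int Int)
      = PySem.Dict.mk [(1, 0), (2, 0), (3, 0)] := by decide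
  simp only [hinit]
  rw [fold_stepA, fold_stepB]
  have hperm := lists_perm arg
  simp [hperm.count_eq]
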